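-- pv_equiv track=rewrite | github.com/advanced-navigation/python | advanced_navigation/an_devices/device_capabilities.py | get_baud_rate_array
-- ===== SOURCE A (Python) =====
-- from typing import List
--
-- def get_baud_rate_array(minimum_baud: int, maximum_baud: int) -> List[str]:
--     """Trim the default baudrate array to values between a minimum and a maximum"""
--     default_baud_rates = [
--         "2400",
--         "4800",
--         "9600",
--         "19200",
--         "38400",
--         "57600",
--         "115200",
--         "230400",
--         "250000",
--         "460800",
--         "500000",
--         "800000",
--         "921600",
--         "1000000",
--         "1250000",
--         "2000000",
--         "4000000",
--         "10000000"
--     ]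
--     return [b for b in default_baud_rates if minimum_baud <= int(b) <= maximum_baud]
-- ===== SOURCE B (Python) =====
-- def _drop_below(rates, minimum_baud):
--     """Skip the sorted prefix whose values are below minimum_baud."""
--     if not rates or int(rates[0]) >= minimum_baud:
--         return rates
--     return _drop_below(rates[1:], minimum_baud)
--
--
-- def _take_upto(rates, maximum_baud):
--     """Take the sorted prefix whose values do not exceed maximum_baud."""
--     if not rates or int(rates[0]) > maximum_baud:
--         return []
--     return [rates[0]] + _take_upto(rates[1:], maximum_baud)
--
--
-- def get_baud_rate_array(minimum_baud: int, maximum_baud: int):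
--     """Trim the default baudrate array to values between a minimum and a maximum.
--
--     The table is sorted ascending, so the answer is a contiguous block:
--     drop the prefix below the minimum, then take while within the maximum
--     (no per-element range test over the whole list)."""
--     default_baud_rates = [
--         "2400",
--         "4800",
--         "9600",
--         "19200",
--         "38400",
--         "57600",
--         "115200",
--         "230400",
--         "250000",
--         "460800",
--         "500000",
--         "800000",
--         "921600",
--         "1000000",
--         "1250000",
--         "2000000",
--         "4000000",
--         "10000000"
--     ]
--     return _take_upto(_drop_below(default_baud_rates, minimum_baud), maximum_baud)
-- ===== Notes on version B (the rewrite author's own statement) =====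
-- stated objective: alternative
-- what changed: Replaces the per-element range-test comprehension with a drop-prefix/take-prefix decomposition that exploits the ascending order of the table: skip the sorted prefix below the minimum, then take entries until the maximum is exceeded, stopping early.
import Mathlib
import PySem

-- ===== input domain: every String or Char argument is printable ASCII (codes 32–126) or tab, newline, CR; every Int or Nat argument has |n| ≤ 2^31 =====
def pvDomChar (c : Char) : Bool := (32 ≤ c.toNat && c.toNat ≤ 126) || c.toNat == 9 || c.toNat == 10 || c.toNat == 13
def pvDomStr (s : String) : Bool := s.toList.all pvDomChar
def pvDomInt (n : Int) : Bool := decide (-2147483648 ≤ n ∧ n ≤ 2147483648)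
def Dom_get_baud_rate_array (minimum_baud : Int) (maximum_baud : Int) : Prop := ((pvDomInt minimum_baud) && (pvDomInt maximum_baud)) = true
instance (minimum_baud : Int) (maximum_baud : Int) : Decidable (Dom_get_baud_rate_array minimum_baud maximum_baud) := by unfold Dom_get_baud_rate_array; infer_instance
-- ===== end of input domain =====

-- B replaces A's per-element range-test comprehension with a drop-prefix/take-prefix scan of
-- the ascending table (objective: alternative decomposition; the table has fixed size, no speed claim).

-- int(b): every entry of the table is a plain decimal literal, so PySem.Int.ofStr? always
-- succeeds on it; the getD 0 default is never taken (exact on the inputs that occur).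
def pyint (s : String) : Int := (PySem.Int.ofStr? s).getD 0

def defaultBaudRates : List String :=
  ["2400", "4800", "9600", "19200", "38400", "57600", "115200", "230400", "250000",
   "460800", "500000", "800000", "921600", "1000000", "1250000", "2000000", "4000000", "10000000"]

-- ===== PORT A =====
-- literal port of A's list comprehension with the chained comparison minimum <= int(b) <= maximum
def get_baud_rate_array (minimum_baud : Int) (maximum_baud : Int) : List String :=
  defaultBaudRates.filter (fun b => decide (minimum_baud ≤ pyint b) && decide (pyint b ≤ maximum_baud))

-- ===== PORT B =====
-- _drop_below: 'rates[1:]' is the structural tail here (exact for a list recursion head/tail split)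
def dropBelow (rates : List String) (minimum_baud : Int) : List String :=
  match rates with
  | [] => []
  | b :: t => if minimum_baud ≤ pyint b then b :: t else dropBelow t minimum_baud

-- _take_upto
def takeUpto (rates : List String) (maximum_baud : Int) : List String :=
  match rates with
  | [] => []
  | b :: t => if maximum_baud < pyint b then [] else b :: takeUpto t maximum_baud

def get_baud_rate_array_alt (minimum_baud : Int) (maximum_baud : Int) : List String :=
  takeUpto (dropBelow defaultBaudRates minimum_baud) maximum_baud

-- ===== PRECONDITION & SPEC =====
def Spec_get_baud_rate_array (minimum_baud : Int) (maximum_baud : Int) (out : List String) : Prop := out = get_baud_rate_array_alt minimum_baud maximum_baud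
instance (minimum_baud : Int) (maximum_baud : Int) (out : List String) : Decidable (Spec_get_baud_rate_array minimum_baud maximum_baud out) := by unfold Spec_get_baud_rate_array; infer_instance

-- ===== CLAIM (what is proved, stated in full; the proofs are below) =====
def Claim_equal_get_baud_rate_array : Prop := ∀ (minimum_baud : Int) (maximum_baud : Int), Dom_get_baud_rate_array minimum_baud maximum_baud → Spec_get_baud_rate_array minimum_baud maximum_baud (get_baud_rate_array minimum_baud maximum_baud)

-- ===== LEMMAS AND PROOFS =====

-- On a list whose values are all ≥ mn, the range filter is takeUpto, provided the list is sorted.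
theorem filter_eq_takeUpto (mn mx : Int) :
    ∀ (l : List String), l.Pairwise (fun a b => pyint a ≤ pyint b) →
      (∀ x ∈ l, mn ≤ pyint x) →
      l.filter (fun b => decide (mn ≤ pyint b) && decide (pyint b ≤ mx)) = takeUpto l mx := by
  intro l
  induction l with
  | nil => intro _ _; rfl
  | cons a t ih =>
    intro hp hlo
    have ha : mn ≤ pyint a := hlo a (by simp)
    have hat : ∀ x ∈ t, pyint a ≤ pyint x := (List.pairwise_cons.mp hp).1
    have hpt : t.Pairwise (fun a b => pyint a ≤ pyint b) := (List.pairwise_cons.mp hp).2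
    by_cases hmx : pyint a ≤ mx
    · simp [List.filter, takeUpto, ha, hmx, not_lt.mpr hmx,
        ih hpt (fun x hx => hlo x (by simp [hx]))]
    · have hgt : mx < pyint a := lt_of_not_ge hmx
      have : t.filter (fun b => decide (mn ≤ pyint b) && decide (pyint b ≤ mx)) = [] := by
        rw [List.filter_eq_nil_iff]
        intro x hx
        have : mx < pyint x := lt_of_lt_of_le hgt (hat x hx)
        simp [not_le.mpr this]
      simp [List.filter, takeUpto, hmx, hgt, this]

-- On a sorted list, A's range filter equals B's dropBelow-then-takeUpto.
theorem filter_eq_drop_take (mn mx : Int) :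
    ∀ (l : List String), l.Pairwise (fun a b => pyint a ≤ pyint b) →
      l.filter (fun b => decide (mn ≤ pyint b) && decide (pyint b ≤ mx)) =
        takeUpto (dropBelow l mn) mx := by
  intro l
  induction l with
  | nil => intro _; rfl
  | cons a t ih =>
    intro hp
    have hat : ∀ x ∈ t, pyint a ≤ pyint x := (List.pairwise_cons.mp hp).1
    have hpt : t.Pairwise (fun a b => pyint a ≤ pyint b) := (List.pairwise_cons.mp hp).2
    by_cases hlo : mn ≤ pyint a
    · have hall : ∀ x ∈ (a :: t), mn ≤ pyint x := by
        intro x hx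
        rcases List.mem_cons.mp hx with h | h
        · exact h ▸ hlo
        · exact le_trans hlo (hat x h)
      rw [dropBelow, if_pos hlo]
      exact filter_eq_takeUpto mn mx (a :: t) hp hall
    · simp [List.filter, dropBelow, hlo, ih hpt]

theorem defaultBaudRates_sorted :
    defaultBaudRates.Pairwise (fun a b => pyint a ≤ pyint b) := by decide

-- ===== VERDICT (by name: the statement is the Claim_ definition above) =====
theorem get_baud_rate_array_spec : Claim_equal_get_baud_rate_array := by
  intro mn mx _
  unfold Spec_get_baud_rate_array get_baud_rate_array get_baud_rate_array_alt
  exact filter_eq_drop_take mn mx defaultBaudRates defaultBaudRates_sorted
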